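-- pv_equiv track=rewrite | github.com/Roy6lty/Hardware-Pricing-Tool | backend/src/services/hpe_services.py | _calculate_median_recursive
-- ===== SOURCE A (Python) =====
-- def _calculate_median_recursive(sorted_data: list[dict], key: str):
--     """
--     Recursive helper to calculate median from pre-sorted data.
--     Assumes sorted_data is sorted by 'key'.
--     """
--     if not sorted_data:  # Base case for recursion if list becomes empty
--         return None
--
--     if len(sorted_data) == 1:
--         return sorted_data[0]  # return median part even if the price is zero
--
--     n = len(sorted_data)
--
--     if n % 2 == 1:  # Odd number of elements
--         median_element = sorted_data[n // 2]
--         if median_element.get(key, 0) <= 0: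
--             return _calculate_median_recursive(sorted_data[n // 2 + 1 :], key)
--         return median_element
--     else:  # Even number of elements (n >= 2)
--         mid1_idx = n // 2 - 1
--         mid2_idx = n // 2
--
--         mid1_element = sorted_data[mid1_idx]
--         mid2_element = sorted_data[mid2_idx]
--
--         mid1_price = mid1_element.get(key, 0)
--         mid2_price = mid2_element.get(key, 0)
--
--         # If either of the elements that would form the median has a non-positive price,
--         # we discard the lower half (including mid1) and try to find a median in the upper half.
--         if mid1_price <= 0 or mid2_price <= 0:
--
--             return _calculate_median_recursive(sorted_data[mid2_idx:], key)
--         else: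
--             return mid2_element
-- ===== SOURCE B (Python) =====
-- def _calculate_median_recursive(sorted_data: list[dict], key: str):
--     # Key fact: A's recursion state is data-independent -- the viewed suffix always
--     # has length n, N, N//2, N//4, ..., starting at index N - n.  So just walk the
--     # halving sequence of n and test the median candidate at the closed-form index.
--     N = len(sorted_data)
--     if N == 0:
--         return None
--     n = N
--     while n > 1:
--         hi = N - n + n // 2
--         if n % 2 == 1:
--             if sorted_data[hi].get(key, 0) > 0:
--                 return sorted_data[hi]
--         else:
--             if sorted_data[hi - 1].get(key, 0) > 0 and sorted_data[hi].get(key, 0) > 0: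
--                 return sorted_data[hi]
--         n //= 2
--     return sorted_data[N - 1]
-- ===== Notes on version B (the rewrite author's own statement) =====
-- stated objective: alternative
-- what changed: Replaced A's slice-copying recursion by a loop over the data-independent halving sequence of suffix lengths (n, n//2, n//4, ...), testing the median candidate at the closed-form index N - n + n//2, so no sublist is ever materialised.
import Mathlib
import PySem

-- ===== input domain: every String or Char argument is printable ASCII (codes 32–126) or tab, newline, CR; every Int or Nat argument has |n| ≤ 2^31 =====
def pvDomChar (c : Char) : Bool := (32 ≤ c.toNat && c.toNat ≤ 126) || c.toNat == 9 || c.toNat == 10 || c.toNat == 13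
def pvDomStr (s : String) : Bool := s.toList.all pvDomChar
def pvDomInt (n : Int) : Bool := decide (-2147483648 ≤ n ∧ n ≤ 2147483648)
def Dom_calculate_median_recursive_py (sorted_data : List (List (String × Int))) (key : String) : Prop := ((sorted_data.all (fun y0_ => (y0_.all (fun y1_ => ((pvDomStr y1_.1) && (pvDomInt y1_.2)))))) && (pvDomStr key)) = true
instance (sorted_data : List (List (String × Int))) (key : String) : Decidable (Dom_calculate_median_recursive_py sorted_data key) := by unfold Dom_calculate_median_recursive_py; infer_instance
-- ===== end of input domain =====

-- B replaces A's slice-copying recursion by a loop over the data-independent halving sequence of suffix lengths, testing the median candidate at a closed-form index, copying no sublist (objective: alternative).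


-- ===== PORT A =====
-- Literal port of A. Python's l[i] with 0 ≤ i < len l is the in-range getElem?, and the
-- suffix slice l[m:] with 0 ≤ m ≤ len l is List.drop m — both exact here; the `none`
-- match arms are unreachable (indices are always in range). The fuel counter only makes
-- the recursion structural: each step halves the list, so fuel length+1 never runs out.
def pvGoA (fuel : Nat) (l : List (List (String × Int))) (key : String) : Option (List (String × Int)) :=
  match fuel with
  | 0 => none  -- unreachable with fuel = length + 1
  | fuel + 1 =>
    if l.length = 0 then none
    else if l.length = 1 then l[0]?
    else
      let n := l.length
      if n % 2 = 1 then
        match l[n / 2]? with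
        | none => none
        | some me =>
          if PySem.Dict.getD (PySem.Dict.mk me) key (0 : Int) ≤ 0 then
            pvGoA fuel (l.drop (n / 2 + 1)) key
          else some me
      else
        match l[n / 2 - 1]?, l[n / 2]? with
        | some m1, some m2 =>
          if PySem.Dict.getD (PySem.Dict.mk m1) key (0 : Int) ≤ 0 ∨ PySem.Dict.getD (PySem.Dict.mk m2) key (0 : Int) ≤ 0 then
            pvGoA fuel (l.drop (n / 2)) key
          else some m2
        | _, _ => none

def calculate_median_recursive_py (sorted_data : List (List (String × Int))) (key : String) : Option (List (String × Int)) :=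
  pvGoA (sorted_data.length + 1) sorted_data key

-- ===== PORT B =====
-- Literal port of B's while loop: the only loop state is n (the current suffix length),
-- halved each round; the candidate index is the closed form N - n + n/2.  Recursion is
-- well-founded on n itself (n/2 < n whenever the loop body runs).
def pvHalve (l : List (List (String × Int))) (key : String) (n : Nat) : Option (List (String × Int)) :=
  if h : n ≤ 1 then l[l.length - 1]?
  else
    let hi := l.length - n + n / 2
    if n % 2 = 1 then
      match l[hi]? with
      | some e =>
        if 0 < PySem.Dict.getD (PySem.Dict.mk e) key (0 : Int) then some e
        else pvHalve l key (n / 2)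
      | none => none
    else
      match l[hi - 1]?, l[hi]? with
      | some e1, some e2 =>
        if 0 < PySem.Dict.getD (PySem.Dict.mk e1) key (0 : Int) ∧ 0 < PySem.Dict.getD (PySem.Dict.mk e2) key (0 : Int)
        then some e2
        else pvHalve l key (n / 2)
      | _, _ => none
termination_by n
decreasing_by all_goals omega

def calculate_median_recursive_py_alt (sorted_data : List (List (String × Int))) (key : String) : Option (List (String × Int)) :=
  if sorted_data.length = 0 then none
  else pvHalve sorted_data key sorted_data.length

-- ===== PRECONDITION & SPEC =====
def Spec_calculate_median_recursive_py (sorted_data : List (List (String × Int))) (key : String) (out : Option (List (String × Int))) : Prop := out = calculate_median_recursive_py_alt sorted_data key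
instance (sorted_data : List (List (String × Int))) (key : String) (out : Option (List (String × Int))) : Decidable (Spec_calculate_median_recursive_py sorted_data key out) := by unfold Spec_calculate_median_recursive_py; infer_instance

-- ===== CLAIM (what is proved, stated in full; the proofs are below) =====
def Claim_equal_calculate_median_recursive_py : Prop := ∀ (sorted_data : List (List (String × Int))) (key : String), Dom_calculate_median_recursive_py sorted_data key → Spec_calculate_median_recursive_py sorted_data key (calculate_median_recursive_py sorted_data key)

-- ===== LEMMAS AND PROOFS =====

-- A on the suffix of length n (i.e. l.drop (l.length - n)) computes exactly B's loop
-- state n, for 1 ≤ n ≤ l.length and enough fuel.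
theorem pvGoA_drop_eq_pvHalve (l : List (List (String × Int))) (key : String) (fuel n : Nat)
    (h1 : 1 ≤ n) (hn : n ≤ l.length) (hfuel : n < fuel) :
    pvGoA fuel (l.drop (l.length - n)) key = pvHalve l key n := by
  induction fuel generalizing n with
  | zero => omega
  | succ fuel ih =>
    rw [pvHalve]
    unfold pvGoA
    simp only [List.length_drop, List.getElem?_drop, List.drop_drop]
    have hlen : l.length - (l.length - n) = n := by omega
    rw [hlen]
    by_cases hone : n = 1
    · subst hone
      norm_num
    · have h2 : 2 ≤ n := by omega
      rw [if_neg (by omega : ¬ n = 0), if_neg hone, dif_neg (by omega : ¬ n ≤ 1)]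
      by_cases hodd : n % 2 = 1
      · simp only [if_pos hodd]
        cases hget : l[l.length - n + n / 2]? with
        | none => rfl
        | some e =>
          dsimp only
          by_cases hp : PySem.Dict.getD (PySem.Dict.mk e) key (0 : Int) ≤ 0
          · rw [if_pos hp, if_neg (by omega : ¬ 0 < PySem.Dict.getD (PySem.Dict.mk e) key (0 : Int)),
                show l.length - n + (n / 2 + 1) = l.length - (n / 2) by omega]
            exact ih (n / 2) (by omega) (by omega) (by omega)
          · rw [if_neg hp, if_pos (by omega : 0 < PySem.Dict.getD (PySem.Dict.mk e) key (0 : Int))]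
      · simp only [if_neg hodd]
        rw [show l.length - n + (n / 2 - 1) = l.length - n + n / 2 - 1 by omega]
        cases hg1 : l[l.length - n + n / 2 - 1]? with
        | none => rfl
        | some e1 =>
          cases hg2 : l[l.length - n + n / 2]? with
          | none => rfl
          | some e2 =>
            dsimp only
            by_cases hp : PySem.Dict.getD (PySem.Dict.mk e1) key (0 : Int) ≤ 0 ∨ PySem.Dict.getD (PySem.Dict.mk e2) key (0 : Int) ≤ 0
            · rw [if_pos hp, if_neg (by omega : ¬ (0 < PySem.Dict.getD (PySem.Dict.mk e1) key (0 : Int) ∧ 0 < PySem.Dict.getD (PySem.Dict.mk e2) key (0 : Int))),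
                  show l.length - n + n / 2 = l.length - (n / 2) by omega]
              exact ih (n / 2) (by omega) (by omega) (by omega)
            · rw [if_neg hp, if_pos (by omega : 0 < PySem.Dict.getD (PySem.Dict.mk e1) key (0 : Int) ∧ 0 < PySem.Dict.getD (PySem.Dict.mk e2) key (0 : Int))]

-- ===== VERDICT (by name: the statement is the Claim_ definition above) =====
theorem calculate_median_recursive_py_spec : Claim_equal_calculate_median_recursive_py := by
  intro l key _
  unfold Spec_calculate_median_recursive_py calculate_median_recursive_py calculate_median_recursive_py_alt
  by_cases h0 : l.length = 0
  · rw [if_pos h0]; unfold pvGoA; rw [if_pos h0]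
  · rw [if_neg h0]
    have := pvGoA_drop_eq_pvHalve l key (l.length + 1) l.length (by omega) le_rfl (by omega)
    simpa using this
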